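-- pv_equiv track=rewrite | github.com/depixusgenome/libanalysis | utils/gui.py | leastcommonkeys
-- ===== SOURCE A (Python) =====
-- from   typing      import (
--     List, Tuple, Iterable, Set, Union, Optional, Sequence, Dict, cast, TYPE_CHECKING
-- )
--
-- def leastcommonkeys(info, tail = ', ...') -> Dict[str, str]:
--     "return simpler names for a list of track files"
--     if not isinstance(info, dict):
--         info = {i: i for i in info}
--     if len(info) == 1:
--         return info
--
--     tails  = {i for i, j in info.items() if j.endswith(tail)}
--     dflt   = {i: (j[:-len(tail)] if j.endswith(tail) else j) for i, j in info.items()}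
--     keys   = {i: j.split('_')                                for i, j in dflt.items()}
--     common = None
--     for i in keys.values():
--         common = set(i) if common is None else set(i) & cast(set, common)
--
--     if common:
--         keys = {i:'_'.join(k for k in j if k not in common) for i, j in keys.items()}
--     else:
--         keys = {i:'_'.join(k for k in j) for i, j in keys.items()}
--
--     empties = sum(1 for i in keys.values() if i == '')
--     if empties == 1:
--         keys[next(i for i, j in keys.items() if j == '')] = 'ref'
--     elif empties > 1:
--         keys.update({i: dflt[i] for i, j in keys.items() if j == ''})
--     return {i: j+(tail if i in tails else '') for i, j in keys.items()}
-- ===== SOURCE B (Python) =====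
-- def leastcommonkeys(info, tail=', ...'):
--     "return simpler names for a list of track files"
--     if not isinstance(info, dict):
--         info = {i: i for i in info}
--     if len(info) == 1:
--         return dict(info)
--
--     def strip(name):
--         return name[:-len(tail)] if name.endswith(tail) else name
--
--     toks = {k: strip(v).split('_') for k, v in info.items()}
--
--     def shared(tok):
--         # a token kept by nobody: present in every entry's token list
--         return all(tok in ts for ts in toks.values())
--
--     # no common-token set is ever built: each token is tested on the spot, and
--     # when no token is universal the filter keeps everything (A's else-branch)
--     simplified = {k: '_'.join(t for t in ts if not shared(t))
--                   for k, ts in toks.items()}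
--
--     empt = [k for k, s in simplified.items() if s == '']
--     if len(empt) == 1:
--         simplified[empt[0]] = 'ref'
--     elif len(empt) > 1:
--         for k in empt:
--             simplified[k] = strip(info[k])
--     return {k: s + (tail if info[k].endswith(tail) else '')
--             for k, s in simplified.items()}
-- ===== Notes on version B (the rewrite author's own statement) =====
-- stated objective: simpler
-- what changed: Drops A's whole common-set machinery (the tails set, the dflt dict, the running set-intersection fold and the if-common/else branch): B tests each token's universality on the spot with a nested all()-scan over the token lists while joining, which makes the else-branch disappear (when no token is universal the filter keeps everything), and restores the tail by re-checking endswith on the original name instead of a precomputed tails set.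
import Mathlib
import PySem

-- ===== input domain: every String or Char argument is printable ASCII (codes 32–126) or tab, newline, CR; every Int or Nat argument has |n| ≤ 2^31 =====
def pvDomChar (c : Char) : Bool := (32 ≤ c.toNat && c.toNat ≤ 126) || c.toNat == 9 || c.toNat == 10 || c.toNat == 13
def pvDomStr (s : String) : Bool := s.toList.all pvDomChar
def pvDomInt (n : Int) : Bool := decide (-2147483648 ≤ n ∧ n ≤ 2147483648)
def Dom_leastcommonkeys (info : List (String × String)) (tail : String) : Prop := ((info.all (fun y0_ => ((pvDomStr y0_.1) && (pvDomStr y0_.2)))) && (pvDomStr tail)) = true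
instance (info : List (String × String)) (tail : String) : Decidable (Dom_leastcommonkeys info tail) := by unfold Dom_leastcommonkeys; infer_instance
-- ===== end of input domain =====

-- B drops A's tails set, dflt dict and running set-intersection: each token's universality is
-- tested on the spot by a nested scan over the token lists, so no common set (and no else-branch)
-- exists; simpler, not faster.

-- ===== PORT A =====
-- Each Python statement of A is one stage helper (the caller passes the dict's item list).
-- tails = {i for i, j in info.items() if j.endswith(tail)}
def lckA_tails (entries : List (String × String)) (tail : String) : PySem.Set String :=
  PySem.Set.ofList ((entries.filter (fun p => PySem.Str.endswith p.2 tail)).map (fun p => p.1))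

-- dflt = {i: (j[:-len(tail)] if j.endswith(tail) else j) for i, j in info.items()}
def lckA_dflt (entries : List (String × String)) (tail : String) : PySem.Dict String String :=
  PySem.Dict.ofList (entries.map (fun p =>
    (p.1, if PySem.Str.endswith p.2 tail
          then PySem.Str.slice p.2 none (some (-(PySem.Str.len tail)))
          else p.2)))

-- keys = {i: j.split('_') for i, j in dflt.items()}
def lckA_keys1 (entries : List (String × String)) (tail : String) : PySem.Dict String (List String) :=
  PySem.Dict.ofList ((lckA_dflt entries tail).items.map (fun p =>
    (p.1, (PySem.Str.split? p.2 "_").getD [])))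

-- loop body: common = set(i) if common is None else set(i) & common
def lckA_interStep (acc : Option (PySem.Set String)) (i : List String) : Option (PySem.Set String) :=
  some (match acc with
        | none => PySem.Set.ofList i
        | some c => PySem.Set.inter (PySem.Set.ofList i) c)

-- for i in keys.values(): common = …
def lckA_common (entries : List (String × String)) (tail : String) : Option (PySem.Set String) :=
  (lckA_keys1 entries tail).values.foldl lckA_interStep none

-- if common: keys = {i: '_'.join(k for k in j if k not in common) …} else: keys = {i: '_'.join(…) …}
def lckA_keys2 (entries : List (String × String)) (tail : String) : PySem.Dict String String :=
  match lckA_common entries tail with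
  | some c =>
      if !c.isEmpty then
        PySem.Dict.ofList ((lckA_keys1 entries tail).items.map (fun p =>
          (p.1, PySem.Str.join "_" (p.2.filter (fun k => !(PySem.Set.contains c k))))))
      else
        PySem.Dict.ofList ((lckA_keys1 entries tail).items.map (fun p =>
          (p.1, PySem.Str.join "_" p.2)))
  | none =>
      PySem.Dict.ofList ((lckA_keys1 entries tail).items.map (fun p =>
        (p.1, PySem.Str.join "_" p.2)))

-- empties = sum(1 for i in keys.values() if i == '')
def lckA_empties (entries : List (String × String)) (tail : String) : Nat :=
  List.countP (fun j => j == "") (lckA_keys2 entries tail).values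

-- the two empties-patching branches
def lckA_keys3 (entries : List (String × String)) (tail : String) : PySem.Dict String String :=
  if lckA_empties entries tail = 1 then
    match (lckA_keys2 entries tail).items.find? (fun p => p.2 == "") with
    | some p => (lckA_keys2 entries tail).insert p.1 "ref"    -- keys[next(…)] = 'ref'
    | none => lckA_keys2 entries tail                          -- unreachable when empties = 1
  else if 1 < lckA_empties entries tail then
    -- keys.update({i: dflt[i] for i, j in keys.items() if j == ''})
    ((lckA_keys2 entries tail).items.filter (fun p => p.2 == "")).foldl
      (fun k p => k.insert p.1 (((lckA_dflt entries tail).get? p.1).getD "")) (lckA_keys2 entries tail)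
  else lckA_keys2 entries tail

-- return {i: j + (tail if i in tails else '') for i, j in keys.items()}
def lckA_body (entries : List (String × String)) (tail : String) : List (String × String) :=
  (PySem.Dict.ofList ((lckA_keys3 entries tail).items.map (fun p =>
    (p.1, p.2 ++ (if PySem.Set.contains (lckA_tails entries tail) p.1 then tail else ""))))).items

def leastcommonkeys (info : List (String × String)) (tail : String) : List (String × String) :=
  let d : PySem.Dict String String := PySem.Dict.ofList info
  if d.size = 1 then d.items else lckA_body d.items tail

-- ===== PORT B =====
-- def strip(name): return name[:-len(tail)] if name.endswith(tail) else name
def lckB_strip (tail name : String) : String :=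
  if PySem.Str.endswith name tail
  then PySem.Str.slice name none (some (-(PySem.Str.len tail)))
  else name

-- toks = {k: strip(v).split('_') for k, v in info.items()}
def lckB_toks (entries : List (String × String)) (tail : String) : PySem.Dict String (List String) :=
  PySem.Dict.ofList (entries.map (fun p =>
    (p.1, (PySem.Str.split? (lckB_strip tail p.2) "_").getD [])))

-- def shared(tok): return all(tok in ts for ts in toks.values())
def lckB_shared (entries : List (String × String)) (tail tok : String) : Bool :=
  (lckB_toks entries tail).values.all (fun ts => decide (tok ∈ ts))

-- simplified = {k: '_'.join(t for t in ts if not shared(t)) for k, ts in toks.items()}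
def lckB_simplified (entries : List (String × String)) (tail : String) : PySem.Dict String String :=
  PySem.Dict.ofList ((lckB_toks entries tail).items.map (fun p =>
    (p.1, PySem.Str.join "_" (p.2.filter (fun t => !lckB_shared entries tail t)))))

-- empt = [k for k, s in simplified.items() if s == '']
def lckB_empt (entries : List (String × String)) (tail : String) : List String :=
  ((lckB_simplified entries tail).items.filter (fun p => p.2 == "")).map Prod.fst

-- the empties patches; info[k] is a lookup in the input dict
def lckB_patched (entries : List (String × String)) (tail : String) : PySem.Dict String String :=
  if (lckB_empt entries tail).length = 1 then
    (lckB_simplified entries tail).insert ((lckB_empt entries tail).headD "") "ref"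
  else if 1 < (lckB_empt entries tail).length then
    (lckB_empt entries tail).foldl
      (fun d k => d.insert k (lckB_strip tail (((PySem.Dict.ofList entries).get? k).getD "")))
      (lckB_simplified entries tail)
  else lckB_simplified entries tail

-- return {k: s + (tail if info[k].endswith(tail) else '') for k, s in simplified.items()}
def lckB_body (entries : List (String × String)) (tail : String) : List (String × String) :=
  (PySem.Dict.ofList ((lckB_patched entries tail).items.map (fun p =>
    (p.1, p.2 ++ (if PySem.Str.endswith (((PySem.Dict.ofList entries).get? p.1).getD "") tail
                  then tail else ""))))).items

def leastcommonkeys_alt (info : List (String × String)) (tail : String) : List (String × String) :=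
  let d : PySem.Dict String String := PySem.Dict.ofList info
  if d.size = 1 then d.items else lckB_body d.items tail

-- ===== PRECONDITION & SPEC =====
def Spec_leastcommonkeys (info : List (String × String)) (tail : String) (out : List (String × String)) : Prop := out = leastcommonkeys_alt info tail
instance (info : List (String × String)) (tail : String) (out : List (String × String)) : Decidable (Spec_leastcommonkeys info tail out) := by unfold Spec_leastcommonkeys; infer_instance

-- ===== CLAIM (what is proved, stated in full; the proofs are below) =====
def Claim_equal_leastcommonkeys : Prop := ∀ (info : List (String × String)) (tail : String), Dom_leastcommonkeys info tail → Spec_leastcommonkeys info tail (leastcommonkeys info tail)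

-- ===== LEMMAS AND PROOFS =====

-- the per-entry values both programs compute, and the shared-token predicate
def pvBase (tail : String) (p : String × String) : String := lckB_strip tail p.2

def pvToks (tail : String) (p : String × String) : List String :=
  (PySem.Str.split? (pvBase tail p) "_").getD []

def pvAll (entries : List (String × String)) (tail : String) (t : String) : Bool :=
  entries.all (fun p => decide (t ∈ pvToks tail p))

def pvJ (entries : List (String × String)) (tail : String) (p : String × String) : String :=
  PySem.Str.join "_" ((pvToks tail p).filter (fun t => !pvAll entries tail t))

-- generic: a dict built from pairs with distinct keys keeps exactly those pairs
theorem pv_items_ofList {ν : Type} (l : List (String × ν)) (h : (l.map Prod.fst).Nodup) :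
    (PySem.Dict.ofList l).items = l := by
  have h2 := PySem.Dict.items_foldl_insert_fresh (ν:=ν) l Prod.fst Prod.snd PySem.Dict.empty
    (fun a _ => PySem.Dict.contains_empty _) h
  simpa using h2

theorem pv_map_fst_nodup {ν : Type} (entries : List (String × String))
    (f : (String × String) → ν) (hnd : (entries.map Prod.fst).Nodup) :
    ((entries.map (fun p => (p.1, f p))).map Prod.fst).Nodup := by
  simpa [List.map_map, Function.comp] using hnd

theorem pv_get?_ofList_map {ν : Type} (entries : List (String × String))
    (f : (String × String) → ν) (hnd : (entries.map Prod.fst).Nodup)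
    {p : String × String} (hp : p ∈ entries) :
    (PySem.Dict.ofList (entries.map (fun q => (q.1, f q)))).get? p.1 = some (f p) := by
  have hnd2 := pv_map_fst_nodup entries f hnd
  refine PySem.Dict.get?_of_mem_items _ ?_ ?_
  · rw [pv_items_ofList _ hnd2]
    exact List.mem_map.mpr ⟨p, hp, rfl⟩
  · exact PySem.Dict.nodup_keys_ofList _

-- lookup in the rebuilt input dict
theorem pv_get?_entries (entries : List (String × String))
    (hnd : (entries.map Prod.fst).Nodup) {p : String × String} (hp : p ∈ entries) :
    (PySem.Dict.ofList entries).get? p.1 = some p.2 := by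
  have h := pv_get?_ofList_map entries Prod.snd hnd hp
  simpa using h

-- A: dflt and keys dicts
theorem pv_dflt_items (entries : List (String × String)) (tail : String)
    (hnd : (entries.map Prod.fst).Nodup) :
    (lckA_dflt entries tail).items = entries.map (fun p => (p.1, pvBase tail p)) := by
  unfold lckA_dflt
  rw [pv_items_ofList _ (pv_map_fst_nodup entries _ hnd)]
  rfl

theorem pv_keys1_items (entries : List (String × String)) (tail : String)
    (hnd : (entries.map Prod.fst).Nodup) :
    (lckA_keys1 entries tail).items = entries.map (fun p => (p.1, pvToks tail p)) := by
  unfold lckA_keys1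
  rw [pv_dflt_items entries tail hnd, List.map_map]
  rw [pv_items_ofList _ ?_]
  · rfl
  · simpa [List.map_map, Function.comp] using hnd

-- A: the running intersection, characterised by membership
theorem pv_interFold_some (ls : List (List String)) (c0 : PySem.Set String) :
    ∃ c, ls.foldl lckA_interStep (some c0) = some c ∧
      ∀ t, t ∈ c ↔ (t ∈ c0 ∧ ∀ l ∈ ls, t ∈ l) := by
  induction ls generalizing c0 with
  | nil => exact ⟨c0, rfl, fun t => by simp⟩
  | cons l ls ih =>
    obtain ⟨c, hc, hm⟩ := ih (PySem.Set.inter (PySem.Set.ofList l) c0)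
    refine ⟨c, by simpa [lckA_interStep] using hc, fun t => ?_⟩
    rw [hm]
    simp only [PySem.Set.mem_inter, PySem.Set.mem_ofList, List.mem_cons]
    constructor
    · rintro ⟨⟨h1, h2⟩, h3⟩
      refine ⟨h2, fun x hx => ?_⟩
      rcases hx with rfl | hx
      · exact h1
      · exact h3 x hx
    · rintro ⟨h2, h3⟩
      exact ⟨⟨h3 l (Or.inl rfl), h2⟩, fun x hx => h3 x (Or.inr hx)⟩

theorem pv_common_char (entries : List (String × String)) (tail : String)
    (hnd : (entries.map Prod.fst).Nodup) (hne : entries ≠ []) :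
    ∃ c, lckA_common entries tail = some c ∧
      ∀ t, t ∈ c ↔ pvAll entries tail t = true := by
  unfold lckA_common
  have hv : (lckA_keys1 entries tail).values = entries.map (pvToks tail) := by
    show (lckA_keys1 entries tail).items.map Prod.snd = _
    rw [pv_keys1_items entries tail hnd, List.map_map]
    rfl
  rw [hv]
  cases entries with
  | nil => exact absurd rfl hne
  | cons e es =>
    simp only [List.map_cons, List.foldl_cons]
    obtain ⟨c, hc, hm⟩ := pv_interFold_some (es.map (pvToks tail)) (PySem.Set.ofList (pvToks tail e))
    refine ⟨c, by simpa [lckA_interStep] using hc, fun t => ?_⟩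
    rw [hm]
    simp only [PySem.Set.mem_ofList, List.mem_map, pvAll, List.all_eq_true, List.mem_cons,
      decide_eq_true_eq]
    constructor
    · rintro ⟨h1, h2⟩ p hp
      rcases hp with rfl | hp
      · exact h1
      · exact h2 _ ⟨p, hp, rfl⟩
    · intro h
      exact ⟨h e (Or.inl rfl), by rintro l ⟨p, hp, rfl⟩; exact h p (Or.inr hp)⟩

-- A: the simplified-name dict
theorem pv_keys2_items (entries : List (String × String)) (tail : String)
    (hnd : (entries.map Prod.fst).Nodup) (hne : entries ≠ []) :
    (lckA_keys2 entries tail).items = entries.map (fun p => (p.1, pvJ entries tail p)) := by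
  obtain ⟨c, hc, hm⟩ := pv_common_char entries tail hnd hne
  unfold lckA_keys2
  rw [hc]
  dsimp only
  by_cases hce : c.isEmpty
  · have hcnil : c = [] := List.isEmpty_iff.mp hce
    have hallf : ∀ t, pvAll entries tail t = false := by
      intro t
      by_contra h
      have : t ∈ c := (hm t).mpr (by simpa using h)
      simp [hcnil] at this
    rw [hce]
    simp only [Bool.not_true, Bool.false_eq_true, if_false]
    rw [pv_keys1_items entries tail hnd, List.map_map]
    simp only [Function.comp_def]
    rw [pv_items_ofList _ (pv_map_fst_nodup entries _ hnd)]
    refine List.map_congr_left (fun p _ => ?_)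
    unfold pvJ
    rw [List.filter_eq_self.mpr (fun t _ => by simp [hallf t])]
  · rw [Bool.not_eq_true] at hce
    rw [hce]
    simp only [Bool.not_false, if_true]
    rw [pv_keys1_items entries tail hnd, List.map_map]
    simp only [Function.comp_def]
    rw [pv_items_ofList _ (pv_map_fst_nodup entries _ hnd)]
    refine List.map_congr_left (fun p _ => ?_)
    unfold pvJ
    congr 2
    refine List.filter_congr (fun t _ => ?_)
    have : PySem.Set.contains c t = pvAll entries tail t := by
      rw [PySem.Set.contains_eq_decide]
      by_cases ht : t ∈ c
      · simp [ht, (hm t).mp ht]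
      · have : pvAll entries tail t = false := by
          cases h : pvAll entries tail t
          · rfl
          · exact absurd ((hm t).mpr h) ht
        simp [ht, this]
    rw [this]

theorem pv_empties_eq (entries : List (String × String)) (tail : String)
    (hnd : (entries.map Prod.fst).Nodup) (hne : entries ≠ []) :
    lckA_empties entries tail = entries.countP (fun p => pvJ entries tail p == "") := by
  unfold lckA_empties
  show List.countP _ ((lckA_keys2 entries tail).items.map Prod.snd) = _
  rw [pv_keys2_items entries tail hnd hne, List.map_map, List.countP_map]
  rfl

-- B: the token-list dict and the shared predicate
theorem pv_toks_items (entries : List (String × String)) (tail : String)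
    (hnd : (entries.map Prod.fst).Nodup) :
    (lckB_toks entries tail).items = entries.map (fun p => (p.1, pvToks tail p)) := by
  unfold lckB_toks
  rw [pv_items_ofList _ (pv_map_fst_nodup entries _ hnd)]
  rfl

theorem pv_shared_eq (entries : List (String × String)) (tail : String)
    (hnd : (entries.map Prod.fst).Nodup) (t : String) :
    lckB_shared entries tail t = pvAll entries tail t := by
  unfold lckB_shared
  have hv : (lckB_toks entries tail).values = entries.map (pvToks tail) := by
    show (lckB_toks entries tail).items.map Prod.snd = _
    rw [pv_toks_items entries tail hnd, List.map_map]
    rfl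
  rw [hv]
  unfold pvAll
  rw [List.all_map]
  rfl

-- B: the simplified-name dict is the same canonical list as A's
theorem pv_simplified_items (entries : List (String × String)) (tail : String)
    (hnd : (entries.map Prod.fst).Nodup) :
    (lckB_simplified entries tail).items = entries.map (fun p => (p.1, pvJ entries tail p)) := by
  unfold lckB_simplified
  rw [pv_toks_items entries tail hnd, List.map_map]
  simp only [Function.comp_def]
  rw [pv_items_ofList _ (pv_map_fst_nodup entries _ hnd)]
  refine List.map_congr_left (fun p _ => ?_)
  have hf : (fun t => !lckB_shared entries tail t) = (fun t => !pvAll entries tail t) :=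
    funext fun t => by rw [pv_shared_eq entries tail hnd t]
  unfold pvJ
  rw [hf]

-- the two simplified dicts coincide
theorem pv_dicts_eq (entries : List (String × String)) (tail : String)
    (hnd : (entries.map Prod.fst).Nodup) (hne : entries ≠ []) :
    lckA_keys2 entries tail = lckB_simplified entries tail :=
  PySem.Dict.ext (by rw [pv_keys2_items entries tail hnd hne, pv_simplified_items entries tail hnd])

-- B's empties list, canonically
theorem pv_empt_eq (entries : List (String × String)) (tail : String)
    (hnd : (entries.map Prod.fst).Nodup) :
    lckB_empt entries tail
      = (entries.filter (fun p => pvJ entries tail p == "")).map Prod.fst := by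
  unfold lckB_empt
  rw [pv_simplified_items entries tail hnd, List.filter_map, List.map_map]
  rfl

-- glue: the patched dicts agree
theorem pv_keys3_eq_patched (entries : List (String × String)) (tail : String)
    (hnd : (entries.map Prod.fst).Nodup) (hne : entries ≠ []) :
    lckA_keys3 entries tail = lckB_patched entries tail := by
  have hk2 := pv_keys2_items entries tail hnd hne
  have hdicts := pv_dicts_eq entries tail hnd hne
  have hemp := pv_empt_eq entries tail hnd
  have hcnt := pv_empties_eq entries tail hnd hne
  have hlen : (lckB_empt entries tail).length = lckA_empties entries tail := by
    rw [hemp, hcnt, List.length_map, ← List.countP_eq_length_filter]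
  unfold lckA_keys3 lckB_patched
  rw [hlen]
  by_cases h1 : lckA_empties entries tail = 1
  · rw [if_pos h1, if_pos h1]
    have hone : (entries.filter (fun p => pvJ entries tail p == "")).length = 1 := by
      rw [← List.countP_eq_length_filter, ← hcnt]
      exact h1
    obtain ⟨p0, hp0⟩ : ∃ p0, entries.filter (fun p => pvJ entries tail p == "") = [p0] := by
      cases hF : entries.filter (fun p => pvJ entries tail p == "") with
      | nil => rw [hF] at hone; simp at hone
      | cons a l =>
        rw [hF] at hone
        simp at hone
        exact ⟨a, by rw [hone]⟩
    have hfind : (lckA_keys2 entries tail).items.find? (fun p => p.2 == "")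
        = some (p0.1, pvJ entries tail p0) := by
      rw [← List.head?_filter, hk2, List.filter_map]
      simp only [Function.comp_def]
      rw [hp0]
      rfl
    rw [hfind, hemp, hp0]
    dsimp only [List.map_cons, List.headD_cons]
    rw [hdicts]
  · rw [if_neg h1, if_neg h1]
    by_cases h2 : 1 < lckA_empties entries tail
    · rw [if_pos h2, if_pos h2]
      have hAfilter : (lckA_keys2 entries tail).items.filter (fun p => p.2 == "")
          = (entries.filter (fun p => pvJ entries tail p == "")).map
              (fun p => (p.1, pvJ entries tail p)) := by
        rw [hk2, List.filter_map]
        rfl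
      rw [hAfilter, hemp, List.foldl_map, List.foldl_map, hdicts]
      refine PySem.List.foldl_congr_mem _ _ _ _ ?_
      intro acc x hx
      have hxent : x ∈ entries := List.mem_of_mem_filter hx
      have hdget : (lckA_dflt entries tail).get? x.1 = some (pvBase tail x) :=
        pv_get?_ofList_map entries (pvBase tail) hnd hxent
      have heget := pv_get?_entries entries hnd hxent
      rw [hdget, heget]
      rfl
    · rw [if_neg h2, if_neg h2]
      exact hdicts

-- keys of a dict stay inside S through a loop of key-based inserts
theorem pv_foldl_insert_items_sub {ν : Type} (S : List String) (L : List (String × String))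
    (u : String → ν) (d : PySem.Dict String ν)
    (hd : ∀ q ∈ d.items, q.1 ∈ S) (hL : ∀ x ∈ L, x.1 ∈ S) :
    ∀ q ∈ (L.foldl (fun k p => k.insert p.1 (u p.1)) d).items, q.1 ∈ S := by
  induction L generalizing d with
  | nil => exact hd
  | cons x L ih =>
    rw [List.foldl_cons]
    refine ih _ ?_ (fun y hy => hL y (List.mem_cons_of_mem _ hy))
    intro q hq
    rcases (PySem.Dict.mem_items_insert _ _ _ _).mp hq with rfl | ⟨hq', _⟩
    · exact hL x List.mem_cons_self
    · exact hd q hq'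

theorem pv_keys3_keys_sub (entries : List (String × String)) (tail : String)
    (hnd : (entries.map Prod.fst).Nodup) (hne : entries ≠ []) :
    ∀ q ∈ (lckA_keys3 entries tail).items, q.1 ∈ entries.map Prod.fst := by
  have hk2 := pv_keys2_items entries tail hnd hne
  have hbase : ∀ r ∈ (lckA_keys2 entries tail).items, r.1 ∈ entries.map Prod.fst := by
    intro r hr
    rw [hk2] at hr
    obtain ⟨p, hp, rfl⟩ := List.mem_map.mp hr
    exact List.mem_map.mpr ⟨p, hp, rfl⟩
  intro q hq
  unfold lckA_keys3 at hq
  split_ifs at hq with h1 h2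
  · cases hf : (lckA_keys2 entries tail).items.find? (fun p => p.2 == "") with
    | none => rw [hf] at hq; exact hbase q hq
    | some p =>
      rw [hf] at hq
      dsimp only at hq
      rcases (PySem.Dict.mem_items_insert _ _ _ _).mp hq with rfl | ⟨hq', _⟩
      · exact hbase p (List.mem_of_find?_eq_some hf)
      · exact hbase q hq'
  · exact pv_foldl_insert_items_sub _ _ (fun key => ((lckA_dflt entries tail).get? key).getD "")
      _ hbase (fun x hx => hbase x (List.mem_of_mem_filter hx)) q hq
  · exact hbase q hq

-- the two tail tests agree on the dict's keys
theorem pv_tails_agree (entries : List (String × String)) (tail : String)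
    (hnd : (entries.map Prod.fst).Nodup) {k : String} (hk : k ∈ entries.map Prod.fst) :
    PySem.Set.contains (lckA_tails entries tail) k
      = PySem.Str.endswith (((PySem.Dict.ofList entries).get? k).getD "") tail := by
  obtain ⟨p, hp, rfl⟩ := List.mem_map.mp hk
  rw [pv_get?_entries entries hnd hp]
  unfold lckA_tails
  rw [PySem.Set.contains_eq_decide]
  by_cases h : PySem.Str.endswith p.2 tail
  · have hmem : p.1 ∈ PySem.Set.ofList
        ((entries.filter (fun q => PySem.Str.endswith q.2 tail)).map (fun q => q.1)) :=
      (PySem.Set.mem_ofList _ _).mpr (List.mem_map.mpr ⟨p, List.mem_filter.mpr ⟨hp, h⟩, rfl⟩)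
    rw [decide_eq_true hmem]
    exact h.symm
  · have hnmem : p.1 ∉ PySem.Set.ofList
        ((entries.filter (fun q => PySem.Str.endswith q.2 tail)).map (fun q => q.1)) := by
      intro hmem
      obtain ⟨p', hp', hpe⟩ := List.mem_map.mp ((PySem.Set.mem_ofList _ _).mp hmem)
      obtain ⟨hp'ent, hp'has⟩ := List.mem_filter.mp hp'
      have heq := List.inj_on_of_nodup_map hnd hp'ent hp hpe
      rw [heq] at hp'has
      exact h hp'has
    rw [decide_eq_false hnmem]
    rw [Bool.not_eq_true] at h
    exact h.symm

theorem lck_main (entries : List (String × String)) (tail : String)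
    (hnd : (entries.map Prod.fst).Nodup) :
    lckA_body entries tail = lckB_body entries tail := by
  by_cases hne : entries = []
  · subst hne
    rfl
  · unfold lckA_body lckB_body
    rw [pv_keys3_eq_patched entries tail hnd hne]
    have hmap : (lckB_patched entries tail).items.map (fun p =>
        (p.1, p.2 ++ (if PySem.Set.contains (lckA_tails entries tail) p.1 then tail else "")))
        = (lckB_patched entries tail).items.map (fun p =>
        (p.1, p.2 ++ (if PySem.Str.endswith (((PySem.Dict.ofList entries).get? p.1).getD "") tail
                      then tail else ""))) := by
      refine List.map_congr_left (fun q hq => ?_)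
      have hsub : q.1 ∈ entries.map Prod.fst := by
        have hks := pv_keys3_keys_sub entries tail hnd hne q
        rw [pv_keys3_eq_patched entries tail hnd hne] at hks
        exact hks hq
      rw [pv_tails_agree entries tail hnd hsub]
    rw [hmap]

-- ===== VERDICT (by name: the statement is the Claim_ definition above) =====
theorem leastcommonkeys_spec : Claim_equal_leastcommonkeys := by
  intro info tail _
  unfold Spec_leastcommonkeys leastcommonkeys leastcommonkeys_alt
  by_cases h : (PySem.Dict.ofList info).size = 1
  · simp [h]
  · simp only [h, if_false]
    exact lck_main _ tail (PySem.Dict.nodup_keys_ofList info)
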